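-- pv_equiv track=rewrite | github.com/jin0610/Coding_Study | Python3/프로그래머스/1/42862. 체육복/체육복.py | solution
-- ===== SOURCE A (Python) =====
-- def solution(n, lost, reserve):
--     lost = set(lost)
--     reserve = set(reserve)
--
--     temp = lost & reserve
--     lost -= temp
--     reserve -= temp
--
--     for i in sorted(lost):
--         if i - 1 in reserve:
--             reserve.remove(i - 1)
--             lost.remove(i)
--         elif i + 1 in reserve:
--             reserve.remove(i + 1)
--             lost.remove(i)
--
--     return n - len(lost)
-- ===== SOURCE B (Python) =====
-- def solution(n, lost, reserve):
--     # Sort-merge greedy: sorted lists of truly-lost / truly-spare students and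
--     # a forward pointer over the spares, instead of set membership + removal.
--     L = sorted(set(lost) - set(reserve))
--     R = sorted(set(reserve) - set(lost))
--     matched = 0
--     r = 0
--     for i in L:
--         while r < len(R) and R[r] < i - 1:
--             r += 1
--         if r < len(R) and (R[r] == i - 1 or R[r] == i + 1):
--             r += 1
--             matched += 1
--     return n - (len(L) - matched)
-- ===== Notes on version B (the rewrite author's own statement) =====
-- stated objective: alternative
-- what changed: Replaces A's greedy over sorted(lost) with set-membership tests and set removals by a sort-merge scan: both the truly-lost and truly-spare students are sorted once and matched with a single forward pointer over the spares, counting matches instead of mutating sets.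
import Mathlib
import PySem

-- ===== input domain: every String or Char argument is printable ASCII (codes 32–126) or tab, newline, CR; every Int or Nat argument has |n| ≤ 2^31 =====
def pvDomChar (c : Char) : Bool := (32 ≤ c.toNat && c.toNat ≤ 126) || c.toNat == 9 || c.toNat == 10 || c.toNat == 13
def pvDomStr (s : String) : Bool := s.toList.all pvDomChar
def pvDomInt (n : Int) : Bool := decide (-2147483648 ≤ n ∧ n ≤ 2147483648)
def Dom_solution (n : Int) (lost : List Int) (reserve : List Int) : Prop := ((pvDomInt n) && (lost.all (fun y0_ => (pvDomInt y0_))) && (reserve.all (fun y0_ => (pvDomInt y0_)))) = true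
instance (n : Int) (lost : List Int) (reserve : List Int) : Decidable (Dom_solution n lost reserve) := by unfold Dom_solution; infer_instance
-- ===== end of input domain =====

-- B replaces A's sorted-iteration-with-set-removal greedy by a sort-merge scan: two sorted
-- lists and a forward pointer over the spares (alternative decomposition, same asymptotic cost).

-- ===== PORT A =====
-- the loop 'for i in sorted(lost): …' over state (lost, reserve); both .remove calls act on an
-- element just tested (or taken from the snapshot and removed at most once) to be present,
-- so Python's set.remove never raises and equals Set.discard here.
def loopA : List Int → PySem.Set Int × PySem.Set Int → PySem.Set Int × PySem.Set Int
  | [], st => st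
  | i :: rest, (lo, re) =>
    if PySem.Set.contains re (i - 1) then
      loopA rest (PySem.Set.discard lo i, PySem.Set.discard re (i - 1))
    else if PySem.Set.contains re (i + 1) then
      loopA rest (PySem.Set.discard lo i, PySem.Set.discard re (i + 1))
    else
      loopA rest (lo, re)

def solution (n : Int) (lost : List Int) (reserve : List Int) : Int :=
  let lostS : PySem.Set Int := PySem.Set.ofList lost
  let reserveS : PySem.Set Int := PySem.Set.ofList reserve
  let temp : PySem.Set Int := PySem.Set.inter lostS reserveS
  let lostS2 : PySem.Set Int := PySem.Set.diff lostS temp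
  let reserveS2 : PySem.Set Int := PySem.Set.diff reserveS temp
  let final := loopA (PySem.List.sorted lostS2 (fun x => x)) (lostS2, reserveS2)
  n - PySem.Set.len final.1

-- ===== PORT B =====
-- 'while r < len(R) and R[r] < i - 1: r += 1'
def skipIdx (R : List Int) (t : Int) (r : Nat) : Nat :=
  if h : r < R.length then
    if R[r] < t then skipIdx R t (r + 1) else r
  else r
  termination_by R.length - r

-- 'for i in L: …' over state (r, matched)
def loopB (R : List Int) : List Int → Nat → Int → Nat × Int
  | [], r, m => (r, m)
  | i :: rest, r, m =>
    let r' := skipIdx R (i - 1) r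
    if h : r' < R.length then
      if R[r'] == i - 1 || R[r'] == i + 1 then
        loopB R rest (r' + 1) (m + 1)
      else
        loopB R rest r' m
    else
      loopB R rest r' m

def solution_alt (n : Int) (lost : List Int) (reserve : List Int) : Int :=
  let L : List Int := PySem.List.sorted (PySem.Set.diff (PySem.Set.ofList lost) (PySem.Set.ofList reserve)) (fun x => x)
  let R : List Int := PySem.List.sorted (PySem.Set.diff (PySem.Set.ofList reserve) (PySem.Set.ofList lost)) (fun x => x)
  let res := loopB R L 0 0
  n - ((L.length : Int) - res.2)

-- ===== PRECONDITION & SPEC =====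
def Spec_solution (n : Int) (lost : List Int) (reserve : List Int) (out : Int) : Prop := out = solution_alt n lost reserve
instance (n : Int) (lost : List Int) (reserve : List Int) (out : Int) : Decidable (Spec_solution n lost reserve out) := by unfold Spec_solution; infer_instance

-- ===== CLAIM (what is proved, stated in full; the proofs are below) =====
def Claim_equal_solution : Prop := ∀ (n : Int) (lost : List Int) (reserve : List Int), Dom_solution n lost reserve → Spec_solution n lost reserve (solution n lost reserve)

-- ===== LEMMAS AND PROOFS =====

-- list-suffix view of B's pointer loop, used only by the proofs
def skipLt (t : Int) : List Int → List Int
  | [] => []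
  | x :: xs => if x < t then skipLt t xs else x :: xs

def loopBL : List Int → List Int → Int → List Int × Int
  | [], rs, m => (rs, m)
  | i :: rest, rs, m =>
    let rs' := skipLt (i - 1) rs
    if rs'.head? = some (i - 1) ∨ rs'.head? = some (i + 1) then
      loopBL rest rs'.tail (m + 1)
    else
      loopBL rest rs' m

theorem drop_skipIdx (R : List Int) (t : Int) : ∀ r, R.drop (skipIdx R t r) = skipLt t (R.drop r) := by
  intro r
  induction r using skipIdx.induct R t with
  | case1 r h hlt ih =>
    rw [skipIdx, dif_pos h, if_pos hlt]
    rw [ih, List.drop_eq_getElem_cons h, skipLt, if_pos hlt]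
  | case2 r h hlt =>
    rw [skipIdx, dif_pos h, if_neg hlt]
    rw [List.drop_eq_getElem_cons h, skipLt, if_neg hlt]
  | case3 r h =>
    rw [skipIdx, dif_neg h, List.drop_eq_nil_of_le (by omega), skipLt]

theorem skipIdx_le_length (R : List Int) (t : Int) : ∀ r, r ≤ R.length → skipIdx R t r ≤ R.length := by
  intro r
  induction r using skipIdx.induct R t with
  | case1 r h hlt ih => intro _; rw [skipIdx, dif_pos h, if_pos hlt]; exact ih (by omega)
  | case2 r h hlt => intro hr; rw [skipIdx, dif_pos h, if_neg hlt]; exact hr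
  | case3 r h => intro hr; rw [skipIdx, dif_neg h]; exact hr

theorem loopB_eq_loopBL (R : List Int) : ∀ (L : List Int) (r : Nat) (m : Int), r ≤ R.length →
    (loopB R L r m).2 = (loopBL L (R.drop r) m).2 := by
  intro L
  induction L with
  | nil => intro r m _; rfl
  | cons i rest ih =>
    intro r m hr
    rw [loopB, loopBL]
    have hle : skipIdx R (i - 1) r ≤ R.length := skipIdx_le_length R (i - 1) r hr
    have hdrop : R.drop (skipIdx R (i - 1) r) = skipLt (i - 1) (R.drop r) := drop_skipIdx R (i - 1) r
    by_cases h : skipIdx R (i - 1) r < R.length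
    · have hhead : (skipLt (i - 1) (R.drop r)).head? = some R[skipIdx R (i - 1) r] := by
        rw [← hdrop, List.head?_drop, List.getElem?_eq_getElem h]
      simp only [h, dif_pos]
      by_cases hm : R[skipIdx R (i - 1) r] = i - 1 ∨ R[skipIdx R (i - 1) r] = i + 1
      · have : (R[skipIdx R (i - 1) r] == i - 1 || R[skipIdx R (i - 1) r] == i + 1) = true := by
          simp only [Bool.or_eq_true, beq_iff_eq]; exact hm
        rw [if_pos this, if_pos (by rw [hhead]; rcases hm with hm | hm <;> [left; right] <;> simp [hm])]
        rw [ih _ _ (by omega)]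
        congr 1
        rw [← hdrop, List.tail_drop]
      · have : (R[skipIdx R (i - 1) r] == i - 1 || R[skipIdx R (i - 1) r] == i + 1) = false := by
          simp only [Bool.or_eq_false_iff, beq_eq_false_iff_ne]; exact ⟨fun h1 => hm (Or.inl h1), fun h2 => hm (Or.inr h2)⟩
        rw [if_neg (by simp [this]), if_neg (by rw [hhead]; rintro (h1 | h1) <;> (injection h1 with h1; exact hm (by omega)))]
        rw [ih _ _ hle, hdrop]
    · have hnil : skipLt (i - 1) (R.drop r) = [] := by
        rw [← hdrop, List.drop_eq_nil_of_le (by omega)]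
      simp only [h, dif_neg, not_false_iff]
      rw [if_neg (by rw [hnil]; simp)]
      rw [ih _ _ hle, hdrop, hnil]

theorem mem_skipLt (t : Int) : ∀ (rs : List Int), rs.Pairwise (· < ·) → ∀ x, (x ∈ skipLt t rs ↔ x ∈ rs ∧ t ≤ x) := by
  intro rs
  induction rs with
  | nil => intro _ x; simp [skipLt]
  | cons y ys ih =>
    intro hp x
    rw [List.pairwise_cons] at hp
    by_cases hy : y < t
    · rw [skipLt, if_pos hy, ih hp.2 x]
      constructor
      · rintro ⟨h1, h2⟩; exact ⟨List.mem_cons_of_mem _ h1, h2⟩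
      · rintro ⟨h1, h2⟩
        rcases List.mem_cons.1 h1 with h1 | h1
        · omega
        · exact ⟨h1, h2⟩
    · rw [skipLt, if_neg hy]
      constructor
      · intro h1
        refine ⟨h1, ?_⟩
        rcases List.mem_cons.1 h1 with h1 | h1
        · omega
        · have := hp.1 x h1; omega
      · exact fun h => h.1

theorem pairwise_skipLt (t : Int) : ∀ (rs : List Int), rs.Pairwise (· < ·) → (skipLt t rs).Pairwise (· < ·) := by
  intro rs
  induction rs with
  | nil => intro _; exact List.Pairwise.nil
  | cons y ys ih =>
    intro hp
    rw [List.pairwise_cons] at hp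
    by_cases hy : y < t
    · rw [skipLt, if_pos hy]; exact ih hp.2
    · rw [skipLt, if_neg hy]; exact List.pairwise_cons.2 hp

theorem length_discard_of_mem (s : PySem.Set Int) (x : Int) (hn : s.Nodup) (hx : x ∈ s) :
    (PySem.Set.discard s x).length + 1 = s.length := by
  have hperm : (x :: PySem.Set.discard s x).Perm s := by
    rw [List.perm_ext_iff_of_nodup (by
      refine List.nodup_cons.2 ⟨?_, PySem.Set.nodup_discard s x hn⟩
      intro hmem
      exact ((PySem.Set.mem_discard s x x).1 hmem).2 rfl) hn]
    intro a
    simp only [List.mem_cons, PySem.Set.mem_discard]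
    constructor
    · rintro (rfl | ⟨h1, _⟩) <;> [exact hx; exact h1]
    · intro ha
      by_cases hax : a = x
      · exact Or.inl hax
      · exact Or.inr ⟨ha, hax⟩
  simpa using hperm.length_eq

-- main invariant: B's list-view pointer loop counts exactly the matches A's set loop makes
theorem main_inv : ∀ (Ls lo re rs : List Int) (m : Int),
    Ls.Pairwise (· < ·) →
    lo.Nodup → (∀ i ∈ Ls, i ∈ lo) →
    re.Nodup →
    rs.Pairwise (· < ·) → (∀ x ∈ rs, x ∈ re) →
    (∀ x ∈ re, x ∈ rs ∨ ∀ i ∈ Ls, x < i - 1) →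
    (∀ i ∈ Ls, i ∉ re) →
    (loopBL Ls rs m).2 = m + (lo.length : Int) - (((loopA Ls (lo, re)).1).length : Int) := by
  intro Ls
  induction Ls with
  | nil => intro lo re rs m _ _ _ _ _ _ _ _; simp [loopBL, loopA]
  | cons i rest ih =>
    intro lo re rs m hLp hlon hlom hren hrsp hrssub hcov hdisj
    rw [List.pairwise_cons] at hLp
    have hilo : i ∈ lo := hlom i (List.mem_cons_self ..)
    have hire : i ∉ re := hdisj i (List.mem_cons_self ..)
    have hrs'p : (skipLt (i - 1) rs).Pairwise (· < ·) := pairwise_skipLt _ rs hrsp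
    have hmemskip := mem_skipLt (i - 1) rs hrsp
    rw [loopBL, loopA]
    by_cases h1 : PySem.Set.contains re (i - 1) = true
    · -- A lends from the left
      have h1m : (i - 1) ∈ re := (PySem.Set.contains_iff re (i - 1)).1 h1
      have h1rs : (i - 1) ∈ rs := by
        rcases hcov _ h1m with h | h
        · exact h
        · have := h i (List.mem_cons_self ..); omega
      have h1sk : (i - 1) ∈ skipLt (i - 1) rs := (hmemskip _).2 ⟨h1rs, le_refl _⟩
      obtain ⟨hd, tl, heq⟩ : ∃ hd tl, skipLt (i - 1) rs = hd :: tl := by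
        cases hsk : skipLt (i - 1) rs with
        | nil => rw [hsk] at h1sk; cases h1sk
        | cons a b => exact ⟨a, b, rfl⟩
      have hhd : hd = i - 1 := by
        have hhd1 : (i - 1) ≤ hd := ((hmemskip hd).1 (heq ▸ List.mem_cons_self ..)).2
        rw [heq] at h1sk hrs'p
        rcases List.mem_cons.1 h1sk with h | h
        · omega
        · have := (List.pairwise_cons.1 hrs'p).1 _ h; omega
      rw [if_pos h1]
      rw [if_pos (by rw [heq, hhd]; exact Or.inl rfl)]
      have hstep := ih (PySem.Set.discard lo i) (PySem.Set.discard re (i - 1)) tl (m + 1)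
        hLp.2
        (PySem.Set.nodup_discard lo i hlon)
        (fun j hj => (PySem.Set.mem_discard lo i j).2 ⟨hlom j (List.mem_cons_of_mem _ hj), by have := hLp.1 j hj; omega⟩)
        (PySem.Set.nodup_discard re (i - 1) hren)
        (by rw [heq] at hrs'p; exact (List.pairwise_cons.1 hrs'p).2)
        (by
          intro x hx
          have hxsk : x ∈ skipLt (i - 1) rs := heq ▸ List.mem_cons_of_mem _ hx
          have hxrs := (hmemskip x).1 hxsk
          refine (PySem.Set.mem_discard re (i - 1) x).2 ⟨hrssub x hxrs.1, ?_⟩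
          rw [heq] at hrs'p
          have := (List.pairwise_cons.1 hrs'p).1 x hx
          omega)
        (by
          intro x hx
          obtain ⟨hxre, hxne⟩ := (PySem.Set.mem_discard re (i - 1) x).1 hx
          rcases hcov x hxre with hxrs | hsm
          · by_cases hge : i - 1 ≤ x
            · have : x ∈ skipLt (i - 1) rs := (hmemskip x).2 ⟨hxrs, hge⟩
              rw [heq] at this
              rcases List.mem_cons.1 this with h | h
              · exact absurd (h.trans hhd) hxne
              · exact Or.inl h
            · right; intro j hj; have := hLp.1 j hj; omega
          · right; intro j hj; exact hsm j (List.mem_cons_of_mem _ hj))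
        (fun j hj hmem => hdisj j (List.mem_cons_of_mem _ hj) ((PySem.Set.mem_discard re (i - 1) j).1 hmem).1)
      rw [heq]
      simp only [List.tail_cons]
      rw [hstep]
      have := length_discard_of_mem lo i hlon hilo
      omega
    · by_cases h2 : PySem.Set.contains re (i + 1) = true
      · -- A lends from the right
        have h2m : (i + 1) ∈ re := (PySem.Set.contains_iff re (i + 1)).1 h2
        have h1nm : (i - 1) ∉ re := fun hmem => h1 ((PySem.Set.contains_iff re (i - 1)).2 hmem)
        have h2rs : (i + 1) ∈ rs := by
          rcases hcov _ h2m with h | h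
          · exact h
          · have := h i (List.mem_cons_self ..); omega
        have h2sk : (i + 1) ∈ skipLt (i - 1) rs := (hmemskip _).2 ⟨h2rs, by omega⟩
        obtain ⟨hd, tl, heq⟩ : ∃ hd tl, skipLt (i - 1) rs = hd :: tl := by
          cases hsk : skipLt (i - 1) rs with
          | nil => rw [hsk] at h2sk; cases h2sk
          | cons a b => exact ⟨a, b, rfl⟩
        have hhdmem := (hmemskip hd).1 (heq ▸ List.mem_cons_self ..)
        have hhdre : hd ∈ re := hrssub hd hhdmem.1
        have hhd : hd = i + 1 := by
          have hge : (i - 1) ≤ hd := hhdmem.2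
          have hne1 : hd ≠ i - 1 := fun h => h1nm (h ▸ hhdre)
          have hne2 : hd ≠ i := fun h => hire (h ▸ hhdre)
          rw [heq] at h2sk hrs'p
          rcases List.mem_cons.1 h2sk with h | h
          · omega
          · have := (List.pairwise_cons.1 hrs'p).1 _ h; omega
        rw [if_neg h1, if_pos h2]
        rw [if_pos (by rw [heq, hhd]; exact Or.inr rfl)]
        have hstep := ih (PySem.Set.discard lo i) (PySem.Set.discard re (i + 1)) tl (m + 1)
          hLp.2
          (PySem.Set.nodup_discard lo i hlon)
          (fun j hj => (PySem.Set.mem_discard lo i j).2 ⟨hlom j (List.mem_cons_of_mem _ hj), by have := hLp.1 j hj; omega⟩)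
          (PySem.Set.nodup_discard re (i + 1) hren)
          (by rw [heq] at hrs'p; exact (List.pairwise_cons.1 hrs'p).2)
          (by
            intro x hx
            have hxsk : x ∈ skipLt (i - 1) rs := heq ▸ List.mem_cons_of_mem _ hx
            have hxrs := (hmemskip x).1 hxsk
            refine (PySem.Set.mem_discard re (i + 1) x).2 ⟨hrssub x hxrs.1, ?_⟩
            rw [heq] at hrs'p
            have := (List.pairwise_cons.1 hrs'p).1 x hx
            omega)
          (by
            intro x hx
            obtain ⟨hxre, hxne⟩ := (PySem.Set.mem_discard re (i + 1) x).1 hx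
            rcases hcov x hxre with hxrs | hsm
            · by_cases hge : i - 1 ≤ x
              · have : x ∈ skipLt (i - 1) rs := (hmemskip x).2 ⟨hxrs, hge⟩
                rw [heq] at this
                rcases List.mem_cons.1 this with h | h
                · exact absurd (h.trans hhd) hxne
                · exact Or.inl h
              · right; intro j hj; have := hLp.1 j hj; omega
            · right; intro j hj; exact hsm j (List.mem_cons_of_mem _ hj))
          (fun j hj hmem => hdisj j (List.mem_cons_of_mem _ hj) ((PySem.Set.mem_discard re (i + 1) j).1 hmem).1)
        rw [heq]
        simp only [List.tail_cons]
        rw [hstep]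
        have := length_discard_of_mem lo i hlon hilo
        omega
      · -- no lending for this i
        have h1nm : (i - 1) ∉ re := fun hmem => h1 ((PySem.Set.contains_iff re (i - 1)).2 hmem)
        have h2nm : (i + 1) ∉ re := fun hmem => h2 ((PySem.Set.contains_iff re (i + 1)).2 hmem)
        rw [if_neg h1, if_neg h2]
        rw [if_neg (by
          rintro (h | h) <;> {
            cases hsk : skipLt (i - 1) rs with
            | nil => rw [hsk] at h; cases h
            | cons a b =>
              rw [hsk] at h
              injection h with h
              have hmem := (hmemskip a).1 (hsk ▸ List.mem_cons_self ..)
              have := hrssub a hmem.1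
              subst h
              first | exact h1nm this | exact h2nm this })]
        exact ih lo re (skipLt (i - 1) rs) m
          hLp.2 hlon
          (fun j hj => hlom j (List.mem_cons_of_mem _ hj))
          hren hrs'p
          (fun x hx => hrssub x ((hmemskip x).1 hx).1)
          (by
            intro x hxre
            rcases hcov x hxre with hxrs | hsm
            · by_cases hge : i - 1 ≤ x
              · exact Or.inl ((hmemskip x).2 ⟨hxrs, hge⟩)
              · right; intro j hj; have := hLp.1 j hj; omega
            · right; intro j hj; exact hsm j (List.mem_cons_of_mem _ hj))
          (fun j hj => hdisj j (List.mem_cons_of_mem _ hj))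

theorem pairwise_lt_of_sorted_nodup (xs : List Int) (hn : xs.Nodup)
    (h : (PySem.List.sorted xs (fun x => x)).Pairwise (fun a b => (a : Int) ≤ b)) :
    (PySem.List.sorted xs (fun x => x)).Pairwise (· < ·) := by
  have hperm : (PySem.List.sorted xs (fun x => x)).Perm xs := PySem.List.sorted_perm ..
  have hnd : (PySem.List.sorted xs (fun x => x)).Nodup := hperm.nodup_iff.2 hn
  exact (h.and hnd).imp (fun hab => lt_of_le_of_ne hab.1 hab.2)

-- ===== VERDICT (by name: the statement is the Claim_ definition above) =====
theorem solution_spec : Claim_equal_solution := by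
  intro n lost reserve _
  unfold Spec_solution solution solution_alt
  simp only []
  set lostS := PySem.Set.ofList lost with hlostS
  set reserveS := PySem.Set.ofList reserve with hreserveS
  set temp := PySem.Set.inter lostS reserveS with htemp
  set lostS2 := PySem.Set.diff lostS temp with hlostS2
  set reserveS2 := PySem.Set.diff reserveS temp with hreserveS2
  set L0 := PySem.Set.diff lostS reserveS with hL0
  set R0 := PySem.Set.diff reserveS lostS with hR0
  -- membership characterisations
  have hmemL2 : ∀ x, x ∈ lostS2 ↔ (x ∈ lost ∧ x ∉ reserve) := by
    intro x
    simp only [hlostS2, htemp, PySem.Set.mem_diff, PySem.Set.mem_inter, hlostS, hreserveS,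
      PySem.Set.mem_ofList]
    tauto
  have hmemL0 : ∀ x, x ∈ L0 ↔ (x ∈ lost ∧ x ∉ reserve) := by
    intro x
    simp only [hL0, PySem.Set.mem_diff, hlostS, hreserveS, PySem.Set.mem_ofList]
  have hmemR2 : ∀ x, x ∈ reserveS2 ↔ (x ∈ reserve ∧ x ∉ lost) := by
    intro x
    simp only [hreserveS2, htemp, PySem.Set.mem_diff, PySem.Set.mem_inter, hlostS, hreserveS,
      PySem.Set.mem_ofList]
    tauto
  have hmemR0 : ∀ x, x ∈ R0 ↔ (x ∈ reserve ∧ x ∉ lost) := by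
    intro x
    simp only [hR0, PySem.Set.mem_diff, hlostS, hreserveS, PySem.Set.mem_ofList]
  have hnodupL2 : lostS2.Nodup := PySem.Set.nodup_diff _ _ (PySem.Set.nodup_ofList lost)
  have hnodupL0 : L0.Nodup := PySem.Set.nodup_diff _ _ (PySem.Set.nodup_ofList lost)
  have hnodupR2 : reserveS2.Nodup := PySem.Set.nodup_diff _ _ (PySem.Set.nodup_ofList reserve)
  have hnodupR0 : R0.Nodup := PySem.Set.nodup_diff _ _ (PySem.Set.nodup_ofList reserve)
  -- the two sorted lost lists are the same list
  have hLperm : lostS2.Perm L0 := by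
    rw [List.perm_ext_iff_of_nodup hnodupL2 hnodupL0]
    intro a; rw [hmemL2, hmemL0]
  have hLeq : PySem.List.sorted lostS2 (fun x => x) = PySem.List.sorted L0 (fun x => x) :=
    PySem.List.sorted_eq_sorted_of_perm _ _ _ (fun a b h => h) hLperm
  set Ls := PySem.List.sorted L0 (fun x => x) with hLs
  set Rs := PySem.List.sorted R0 (fun x => x) with hRs
  have hLsp : Ls.Pairwise (· < ·) :=
    pairwise_lt_of_sorted_nodup L0 hnodupL0 (PySem.List.sorted_pairwise ..)
  have hRsp : Rs.Pairwise (· < ·) :=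
    pairwise_lt_of_sorted_nodup R0 hnodupR0 (PySem.List.sorted_pairwise ..)
  have hRsperm : Rs.Perm R0 := PySem.List.sorted_perm ..
  have hbridge := loopB_eq_loopBL Rs Ls 0 0 (Nat.zero_le _)
  rw [List.drop_zero] at hbridge
  have hmain := main_inv Ls lostS2 reserveS2 Rs 0
    hLsp
    hnodupL2
    (fun i hi => by
      rw [hmemL2]
      have : i ∈ L0 := (PySem.List.mem_sorted ..).1 hi
      exact (hmemL0 i).1 this)
    hnodupR2
    hRsp
    (fun x hx => by
      rw [hmemR2]
      exact (hmemR0 x).1 (hRsperm.mem_iff.1 hx))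
    (fun x hx => Or.inl (by
      rw [hRs, PySem.List.mem_sorted]
      rw [hmemR2] at hx
      exact (hmemR0 x).2 hx))
    (fun i hi hmem => by
      rw [hmemR2] at hmem
      have : i ∈ L0 := (PySem.List.mem_sorted ..).1 hi
      rw [hmemL0] at this
      exact hmem.2 this.1)
  rw [hLeq]
  rw [hbridge, hmain]
  have hlen : Ls.length = lostS2.length := by
    rw [hLs]
    rw [(PySem.List.sorted_perm L0 (fun x => x) false).length_eq, hLperm.length_eq]
  have hlenA : PySem.Set.len (loopA Ls (lostS2, reserveS2)).1 = (((loopA Ls (lostS2, reserveS2)).1).length : Int) := by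
    simp [PySem.Set.len]
  rw [hlenA]
  omega
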